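-- pv_equiv track=rewrite | github.com/cjw0076/hivemind | hivemind/flow_runtime.py | workflow_group_status
-- ===== SOURCE A (Python) =====
-- from typing import Any
--
-- def workflow_group_status(members: list[dict[str, Any]]) -> str:
--     if not members:
--         return "not_required"
--     statuses = {str(member.get("status")) for member in members}
--     if "failed" in statuses:
--         return "failed"
--     if statuses <= {"completed"}:
--         return "done"
--     if statuses <= {"prepared", "ready", "completed"}:
--         return "ready"
--     return "pending"
-- ===== SOURCE B (Python) =====
-- def workflow_group_status(members):
--     if not members:
--         return "not_required"
--     rank = {"completed": 0, "prepared": 1, "ready": 1, "failed": 3}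
--     worst = 0
--     for member in members:
--         worst = max(worst, rank.get(str(member.get("status")), 2))
--     return ("done", "ready", "pending", "failed")[worst]
-- ===== Notes on version B (the rewrite author's own statement) =====
-- stated objective: alternative
-- what changed: Maps each status to a numeric severity rank (completed=0, prepared/ready=1, unknown=2, failed=3), reduces the group to the maximum rank, and decodes that maximum through a constant lookup table, replacing A's set construction and subset-test cascade.
import Mathlib
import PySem

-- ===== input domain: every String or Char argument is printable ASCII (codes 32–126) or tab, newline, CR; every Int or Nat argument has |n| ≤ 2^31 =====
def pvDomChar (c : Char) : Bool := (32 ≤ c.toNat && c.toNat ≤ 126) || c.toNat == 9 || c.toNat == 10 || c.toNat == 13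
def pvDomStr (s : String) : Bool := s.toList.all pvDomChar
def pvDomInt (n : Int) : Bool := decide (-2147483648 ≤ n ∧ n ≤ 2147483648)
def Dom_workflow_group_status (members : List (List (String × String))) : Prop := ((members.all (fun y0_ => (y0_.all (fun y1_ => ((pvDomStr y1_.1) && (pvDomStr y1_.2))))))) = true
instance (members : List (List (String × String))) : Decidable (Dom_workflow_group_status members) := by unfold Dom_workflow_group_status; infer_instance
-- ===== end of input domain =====

-- B replaces A's status-set construction and subset-test cascade by a reduction to the
-- maximum of a numeric severity rank per member, decoded through a constant table
-- (alternative algorithm, same cost).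

-- ===== PORT A =====
-- str(member.get("status")): values are strings, so str is identity; a missing key gives str(None) = "None"
def pvStatusOf (m : List (String × String)) : String := PySem.Dict.getD (PySem.Dict.mk m) "status" "None"

def workflow_group_status (members : List (List (String × String))) : String :=
  if members = [] then "not_required"
  else
    let statuses : PySem.Set String := PySem.Set.ofList (members.map pvStatusOf)
    if PySem.Set.contains statuses "failed" then "failed"
    else if PySem.Set.issubset statuses ["completed"] then "done"
    else if PySem.Set.issubset statuses ["prepared", "ready", "completed"] then "ready"
    else "pending"

-- ===== PORT B =====
-- rank.get(str(member.get("status")), 2) with the constant dict of Source B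
def pvRank (m : List (String × String)) : Nat :=
  PySem.Dict.getD
    (PySem.Dict.mk [("completed", 0), ("prepared", 1), ("ready", 1), ("failed", 3)])
    (PySem.Dict.getD (PySem.Dict.mk m) "status" "None") 2

-- ("done", "ready", "pending", "failed")[worst]  (worst is always 0..3)
def pvDecode (worst : Nat) : String :=
  match worst with
  | 0 => "done"
  | 1 => "ready"
  | 2 => "pending"
  | _ => "failed"

def workflow_group_status_alt (members : List (List (String × String))) : String :=
  if members = [] then "not_required"
  else
    let worst := members.foldl (fun worst m => max worst (pvRank m)) 0
    pvDecode worst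

-- ===== PRECONDITION & SPEC =====
def Spec_workflow_group_status (members : List (List (String × String))) (out : String) : Prop := out = workflow_group_status_alt members
instance (members : List (List (String × String))) (out : String) : Decidable (Spec_workflow_group_status members out) := by unfold Spec_workflow_group_status; infer_instance

-- ===== CLAIM (what is proved, stated in full; the proofs are below) =====
def Claim_equal_workflow_group_status : Prop := ∀ (members : List (List (String × String))), Dom_workflow_group_status members → Spec_workflow_group_status members (workflow_group_status members)

-- ===== LEMMAS AND PROOFS =====

-- rank of a status string, on the statuses themselves
def pvR (s : String) : Nat :=
  if s = "completed" then 0 else if s = "prepared" then 1 else if s = "ready" then 1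
  else if s = "failed" then 3 else 2

theorem pvTable (s : String) :
    PySem.Dict.getD
      (PySem.Dict.mk [("completed", 0), ("prepared", 1), ("ready", 1), ("failed", 3)]) s 2 = pvR s := by
  simp only [pvR, PySem.Dict.getD, PySem.Dict.get?_mk_cons, beq_iff_eq]
  by_cases h0 : s = "completed" <;> by_cases h1 : s = "prepared" <;>
    by_cases h2 : s = "ready" <;> by_cases h3 : s = "failed" <;>
    simp_all [PySem.Dict.get?, eq_comm]

theorem pvRank_eq (m : List (String × String)) : pvRank m = pvR (pvStatusOf m) := pvTable _

theorem pvR_le_three (s : String) : pvR s ≤ 3 := by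
  unfold pvR; split_ifs <;> omega

-- foldl max over the ranks, generalized start
theorem pvFold_max (ms : List (List (String × String))) (a : Nat) :
    ms.foldl (fun worst m => max worst (pvRank m)) a =
      max a ((ms.map (fun m => pvR (pvStatusOf m))).foldr max 0) := by
  induction ms generalizing a with
  | nil => simp
  | cons m ms ih =>
      rw [List.foldl_cons, ih]
      simp [pvRank_eq, max_assoc]

-- the foldr-max of a list of naturals: bounds and attainment
theorem pvMaxR_le (L : List Nat) (k : Nat) (h : ∀ x ∈ L, x ≤ k) : L.foldr max 0 ≤ k := by
  induction L with
  | nil => simp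
  | cons x L ih =>
      simp only [List.foldr_cons]
      exact max_le (h x (by simp)) (ih (fun y hy => h y (by simp [hy])))

theorem pvLe_maxR (L : List Nat) (x : Nat) (h : x ∈ L) : x ≤ L.foldr max 0 := by
  induction L with
  | nil => simp at h
  | cons y L ih =>
      simp only [List.foldr_cons]
      rcases List.mem_cons.mp h with rfl | h'
      · exact le_max_left _ _
      · exact le_trans (ih h') (le_max_right _ _)

theorem pvMaxR_attained (L : List Nat) (h : L.foldr max 0 ≠ 0) :
    L.foldr max 0 ∈ L := by
  induction L with
  | nil => simp at h
  | cons x L ih =>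
      simp only [List.foldr_cons] at h ⊢
      by_cases hx : L.foldr max 0 ≤ x
      · rw [max_eq_left hx]; exact List.mem_cons_self
      · have hle : x ≤ L.foldr max 0 := le_of_not_ge hx
        rw [max_eq_right hle] at h ⊢
        exact List.mem_cons_of_mem _ (ih h)

-- A's set tests as boolean list tests
theorem pvContains_eq (L : List String) :
    PySem.Set.contains (PySem.Set.ofList L) "failed" = L.any (· == "failed") := by
  rcases h : L.any (· == "failed") with _ | _
  · simp only [List.any_eq_false] at h
    apply Bool.eq_false_iff.mpr
    intro hc
    have := (PySem.Set.mem_ofList (xs := L) (y := "failed")).mp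
      (by simpa [PySem.Set.contains] using hc)
    exact absurd (beq_self_eq_true "failed") (by simpa using h _ this)
  · simp only [List.any_eq_true] at h
    obtain ⟨x, hx, hxeq⟩ := h
    have : x = "failed" := by simpa using hxeq
    subst this
    simpa [PySem.Set.contains] using
      List.elem_eq_true_of_mem ((PySem.Set.mem_ofList (xs := L) (y := "failed")).mpr hx)

theorem pvSub_eq (L : List String) (t : List String) :
    PySem.Set.issubset (PySem.Set.ofList L) t = L.all (fun s => decide (s ∈ t)) := by
  rcases h : L.all (fun s => decide (s ∈ t)) with _ | _
  · simp only [List.all_eq_false] at h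
    obtain ⟨x, hx, hxnot⟩ := h
    apply Bool.eq_false_iff.mpr
    intro hc
    have := (PySem.Set.issubset_iff (s := PySem.Set.ofList L) (t := t)).mp hc x
      ((PySem.Set.mem_ofList (xs := L) (y := x)).mpr hx)
    simp [this] at hxnot
  · simp only [List.all_eq_true] at h
    apply (PySem.Set.issubset_iff (s := PySem.Set.ofList L) (t := t)).mpr
    intro x hx
    have := h x ((PySem.Set.mem_ofList (xs := L) (y := x)).mp hx)
    simpa using this

-- rank facts
theorem pvR_eq_three_iff (s : String) : pvR s = 3 ↔ s = "failed" := by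
  unfold pvR; split_ifs <;> simp_all
theorem pvR_eq_zero_iff (s : String) : pvR s = 0 ↔ s = "completed" := by
  unfold pvR; split_ifs <;> simp_all
theorem pvR_le_one_iff (s : String) :
    pvR s ≤ 1 ↔ (s = "prepared" ∨ s = "ready" ∨ s = "completed") := by
  unfold pvR; split_ifs <;> simp_all

-- ===== VERDICT (by name: the statement is the Claim_ definition above) =====
theorem workflow_group_status_spec : Claim_equal_workflow_group_status := by
  intro members _
  unfold Spec_workflow_group_status workflow_group_status workflow_group_status_alt
  by_cases hne : members = []
  · simp [hne]
  · simp only [if_neg hne]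
    rw [pvFold_max, pvContains_eq, pvSub_eq, pvSub_eq]
    set S := members.map pvStatusOf with hS
    set R := S.map pvR with hR
    have hmap : members.map (fun m => pvR (pvStatusOf m)) = R := by
      simp [hR, hS, List.map_map, Function.comp]
    rw [hmap]
    rw [Nat.zero_max]
    set W := R.foldr max 0 with hW
    have hW3 : W ≤ 3 := pvMaxR_le R 3 (by
      intro x hx; rw [hR] at hx
      obtain ⟨s, _, rfl⟩ := List.mem_map.mp hx
      exact pvR_le_three s)
    -- any failed ↔ W = 3
    have hfail : S.any (· == "failed") = true ↔ W = 3 := by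
      constructor
      · intro h
        obtain ⟨s, hs, hseq⟩ := List.any_eq_true.mp h
        have hs3 : pvR s = 3 := (pvR_eq_three_iff s).mpr (by simpa using hseq)
        have := pvLe_maxR R (pvR s) (by rw [hR]; exact List.mem_map_of_mem hs)
        omega
      · intro h
        have hmem : W ∈ R := pvMaxR_attained R (by omega)
        rw [hR] at hmem
        obtain ⟨s, hs, hseq⟩ := List.mem_map.mp hmem
        exact List.any_eq_true.mpr ⟨s, hs, by
          simp [(pvR_eq_three_iff s).mp (by omega)]⟩
    -- all completed ↔ W = 0
    have hdone : (S.all (fun s => decide (s ∈ (["completed"] : List String)))) = true ↔ W = 0 := by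
      constructor
      · intro h
        have hle : W ≤ 0 := pvMaxR_le R 0 (by
          intro x hx; rw [hR] at hx
          obtain ⟨s, hs, rfl⟩ := List.mem_map.mp hx
          have := List.all_eq_true.mp h s hs
          have hsc : s = "completed" := by simpa using this
          simp [pvR_eq_zero_iff, hsc])
        omega
      · intro h
        apply List.all_eq_true.mpr
        intro s hs
        have := pvLe_maxR R (pvR s) (by rw [hR]; exact List.mem_map_of_mem hs)
        have : pvR s = 0 := by omega
        simpa using (pvR_eq_zero_iff s).mp this
    -- all in {prepared,ready,completed} ↔ W ≤ 1
    have hready : (S.all (fun s => decide (s ∈ (["prepared", "ready", "completed"] : List String)))) = true ↔ W ≤ 1 := by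
      constructor
      · intro h
        apply pvMaxR_le
        intro x hx; rw [hR] at hx
        obtain ⟨s, hs, rfl⟩ := List.mem_map.mp hx
        have := List.all_eq_true.mp h s hs
        apply (pvR_le_one_iff s).mpr
        simpa using this
      · intro h
        apply List.all_eq_true.mpr
        intro s hs
        have := pvLe_maxR R (pvR s) (by rw [hR]; exact List.mem_map_of_mem hs)
        have := (pvR_le_one_iff s).mp (by omega)
        simp [this]
    by_cases h3 : W = 3
    · rw [if_pos (hfail.mpr h3), h3]; rfl
    · rw [if_neg (fun h => h3 (hfail.mp h))]
      by_cases h0 : W = 0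
      · rw [if_pos (hdone.mpr h0), h0]; rfl
      · rw [if_neg (fun h => h0 (hdone.mp h))]
        by_cases h1 : W = 1
        · rw [if_pos (hready.mpr (by omega)), h1]; rfl
        · have h2 : W = 2 := by omega
          rw [if_neg (fun h => by have := hready.mp h; omega), h2]; rfl
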